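-- pv_equiv track=rewrite | github.com/djdakdclsckddlek/coding_test | 프로그래머스/1/258712. 가장 많이 받은 선물/가장 많이 받은 선물.py | solution
-- ===== SOURCE A (Python) =====
-- from itertools import permutations
--
-- def solution(friends, gifts):
--     giftpoints = {x : 0 for x in friends}
--     nums = {name : 0 for name in permutations(friends, 2)}
--     result = [0]  * len(friends)
--     for g in gifts:
--         giver, receiver = g.split()
--         giftpoints[giver] += 1
--         giftpoints[receiver] -= 1
--         nums[(giver, receiver)] += 1
--
--     for k in range(len(friends)-1):
--
--         for i in range(k, len(friends)-1):
--
--             p1 = nums[(friends[k], friends[i+1])]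
--             p2 = nums[(friends[i+1], friends[k])]
--             if p1 > p2:
--                 result[k] += 1
--             elif p1 < p2:
--                 result[i+1] += 1
--             else:
--                 p1_point = giftpoints[friends[k]]
--                 p2_point = giftpoints[friends[i+1]]
--
--                 if p1_point > p2_point:
--                     result[k] += 1
--                 elif p1_point < p2_point:
--                     result[i+1] += 1
--     return max(result)
-- ===== SOURCE B (Python) =====
-- def solution(friends, gifts):
--     # pair counts and net gift scores in one pass over the gift lines
--     cnt = {}
--     score = {}
--     for g in gifts:
--         a, b = g.split()
--         cnt[(a, b)] = cnt.get((a, b), 0) + 1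
--         score[a] = score.get(a, 0) + 1
--         score[b] = score.get(b, 0) - 1
--
--     def beats(x, y):
--         # Python tuple comparison = lexicographic: more direct gifts, then higher score
--         return (cnt.get((x, y), 0), score.get(x, 0)) > (cnt.get((y, x), 0), score.get(y, 0))
--
--     # head-vs-tail recursion: wins of each friend built as a pure list, no index arithmetic
--     def go(lst):
--         if not lst:
--             return []
--         head, tail = lst[0], lst[1:]
--         hw = sum(1 for o in tail if beats(head, o))
--         return [hw] + [w + (1 if beats(o, head) else 0)
--                        for w, o in zip(go(tail), tail)]
--
--     return max(go(friends))
-- ===== Notes on version B (the rewrite author's own statement) =====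
-- stated objective: alternative
-- what changed: A pre-seeds a permutation-keyed dict and walks the upper triangle with two index loops mutating a result array; B builds count/score dicts in one pass, expresses 'beats' as a single lexicographic tuple comparison, and computes the per-friend win list by a pure head-vs-tail recursion (head counted against the tail, the tail's list rebuilt with zip), returning its max.
import Mathlib
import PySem

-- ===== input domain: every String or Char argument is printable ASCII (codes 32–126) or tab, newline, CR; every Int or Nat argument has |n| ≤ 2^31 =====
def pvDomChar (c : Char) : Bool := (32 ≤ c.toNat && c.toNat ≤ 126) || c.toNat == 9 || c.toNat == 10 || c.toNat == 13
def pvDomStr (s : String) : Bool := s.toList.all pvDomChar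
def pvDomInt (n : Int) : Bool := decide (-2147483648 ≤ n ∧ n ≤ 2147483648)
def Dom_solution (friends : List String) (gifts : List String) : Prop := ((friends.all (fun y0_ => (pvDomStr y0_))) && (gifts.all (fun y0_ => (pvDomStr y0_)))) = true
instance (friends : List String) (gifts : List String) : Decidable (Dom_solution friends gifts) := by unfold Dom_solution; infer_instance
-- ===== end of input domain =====

-- B replaces A's permutation-seeded dict plus upper-triangle index walk (mutable result array)
-- by count/score dicts built in one pass, a lexicographic-tuple "beats" test, and a pure
-- head-vs-tail recursion building each friend's win list; same return value ("alternative").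


-- ===== PORT A =====
-- Transliteration of A.  'giftpoints[x] += 1' / 'nums[k] += 1' are ported with Dict.modify,
-- which inserts when the key is absent where Python raises KeyError; Pre_solution guarantees
-- the key is present, so the port is exact on the admitted domain.
-- 'giver, receiver = g.split()' + the three dict updates of A's first loop (ValueError outside Pre_)
def solutionGiftStep (st : PySem.Dict String Int × PySem.Dict (String × String) Int)
    (g : String) : PySem.Dict String Int × PySem.Dict (String × String) Int :=
  match PySem.Str.split₀ g with
  | [giver, receiver] =>
      ((st.1.modify giver 0 (· + 1)).modify receiver 0 (· - 1),
       st.2.modify (giver, receiver) 0 (· + 1))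
  | _ => st

def solution (friends : List String) (gifts : List String) : Int :=
  let giftpoints0 : PySem.Dict String Int :=
    friends.foldl (fun d x => d.insert x 0) PySem.Dict.empty
  -- nums = {name : 0 for name in permutations(friends, 2)}
  let permKeys : List (String × String) :=
    (List.range friends.length).flatMap (fun i =>
      ((List.range friends.length).filter (fun j => j ≠ i)).map (fun j =>
        (friends.getD i "", friends.getD j "")))
  let nums0 : PySem.Dict (String × String) Int :=
    permKeys.foldl (fun d k => d.insert k 0) PySem.Dict.empty
  let st := gifts.foldl solutionGiftStep (giftpoints0, nums0)
  let giftpoints := st.1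
  let nums := st.2
  let n : Int := PySem.List.len friends
  let result0 : List Int := List.replicate friends.length 0
  let result := (PySem.List.pyRange 0 (n - 1)).foldl (fun result k =>
      (PySem.List.pyRange k (n - 1)).foldl (fun result i =>
        let p1 := nums.getD (PySem.List.pyGetD friends k "", PySem.List.pyGetD friends (i+1) "") 0
        let p2 := nums.getD (PySem.List.pyGetD friends (i+1) "", PySem.List.pyGetD friends k "") 0
        if p1 > p2 then
          PySem.List.pySetD result k (PySem.List.pyGetD result k 0 + 1)
        else if p1 < p2 then
          PySem.List.pySetD result (i+1) (PySem.List.pyGetD result (i+1) 0 + 1)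
        else
          let p1p := giftpoints.getD (PySem.List.pyGetD friends k "") 0
          let p2p := giftpoints.getD (PySem.List.pyGetD friends (i+1) "") 0
          if p1p > p2p then
            PySem.List.pySetD result k (PySem.List.pyGetD result k 0 + 1)
          else if p1p < p2p then
            PySem.List.pySetD result (i+1) (PySem.List.pyGetD result (i+1) 0 + 1)
          else result) result) result0
  PySem.List.maxD result (fun y => y) 0  -- max(result); result is nonempty under Pre_solution

-- ===== PORT B =====
-- Transliteration of Source B's first loop: 'a, b = g.split()' (ValueError outside Pre_), then
-- cnt[(a,b)] = cnt.get((a,b),0)+1 ; score[a] = score.get(a,0)+1 ; score[b] = score.get(b,0)-1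
def solutionAltStep (st : PySem.Dict (String × String) Int × PySem.Dict String Int)
    (g : String) : PySem.Dict (String × String) Int × PySem.Dict String Int :=
  match PySem.Str.split₀ g with
  | [a, b] =>
      let cnt := st.1.insert (a, b) (st.1.getD (a, b) 0 + 1)
      let sc1 := st.2.insert a (st.2.getD a 0 + 1)
      (cnt, sc1.insert b (sc1.getD b 0 - 1))
  | _ => st

-- Source B's 'beats': Python tuple comparison (c1, s1) > (c2, s2) is lexicographic
def solutionAltBeats (cnt : PySem.Dict (String × String) Int) (score : PySem.Dict String Int)
    (x y : String) : Bool :=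
  decide (cnt.getD (x, y) 0 > cnt.getD (y, x) 0 ∨
    (cnt.getD (x, y) 0 = cnt.getD (y, x) 0 ∧ score.getD x 0 > score.getD y 0))

-- Source B's 'go': pure head-vs-tail recursion producing the win list
def solutionAltGo (beats : String → String → Bool) : List String → List Int
  | [] => []
  | h :: t =>
      let hw : Int := ((t.filter (fun o => beats h o)).length : Int)
      hw :: ((solutionAltGo beats t).zip t).map (fun wo => wo.1 + (if beats wo.2 h then 1 else 0))

def solution_alt (friends : List String) (gifts : List String) : Int :=
  let st := gifts.foldl solutionAltStep (PySem.Dict.empty, PySem.Dict.empty)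
  PySem.List.maxD (solutionAltGo (solutionAltBeats st.1 st.2) friends) (fun y => y) 0

-- ===== PRECONDITION & SPEC =====
-- Pre_ admits exactly the inputs where A returns: a nonempty friend list, and every gift line
-- splitting into exactly two names that are keys of A's dicts (both in friends, and distinct
-- unless the name occurs twice in friends, so that the permutation key (a,a) exists);
-- everywhere else A raises (ValueError on a malformed line, KeyError on a missing key,
-- ValueError from max on an empty friend list).
def Pre_solution (friends : List String) (gifts : List String) : Prop :=
  friends ≠ [] ∧ ∀ g ∈ gifts, ∃ a ∈ friends, ∃ b ∈ friends,
    PySem.Str.split₀ g = [a, b] ∧ (a ≠ b ∨ 2 ≤ friends.count a)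
instance (friends : List String) (gifts : List String) : Decidable (Pre_solution friends gifts) := by
  unfold Pre_solution; infer_instance

def pvWitness_solution : List String × List String :=
  (["muzi", "ryan", "frodo"], ["muzi ryan", "ryan frodo", "muzi frodo", "ryan muzi"])

def Spec_solution (friends : List String) (gifts : List String) (out : Int) : Prop := out = solution_alt friends gifts
instance (friends : List String) (gifts : List String) (out : Int) : Decidable (Spec_solution friends gifts out) := by unfold Spec_solution; infer_instance

-- ===== CLAIM (what is proved, stated in full; the proofs are below) =====
def Claim_equal_solution : Prop := ∀ (friends : List String) (gifts : List String), Dom_solution friends gifts → Pre_solution friends gifts → Spec_solution friends gifts (solution friends gifts)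

-- ===== LEMMAS AND PROOFS =====

-- The two gift names on a line (both ports read them the same way under Pre_).
def pvPairOf (g : String) : String × String :=
  match PySem.Str.split₀ g with
  | a :: b :: _ => (a, b)
  | _ => ("", "")

-- count of (a,b) gift lines, give-minus-receive score, and the "beats" relation
def pvC (P : List (String × String)) (a b : String) : Int := P.count (a, b)
def pvS (P : List (String × String)) (x : String) : Int :=
  ((P.filter (fun p => p.1 = x)).length : Int) - ((P.filter (fun p => p.2 = x)).length : Int)
def pvBeat (P : List (String × String)) (a b : String) : Bool :=
  decide (pvC P a b > pvC P b a ∨ (pvC P a b = pvC P b a ∧ pvS P a > pvS P b))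

-- index-level step of A's double loop, its per-cell contribution, the visited pair list,
-- and the per-friend win count
def pvStep (b : Nat → Nat → Bool) (r : List Int) (kj : Nat × Nat) : List Int :=
  if b kj.1 kj.2 then r.set kj.1 (r.getD kj.1 0 + 1)
  else if b kj.2 kj.1 then r.set kj.2 (r.getD kj.2 0 + 1)
  else r
def pvContrib (b : Nat → Nat → Bool) (m : Nat) (kj : Nat × Nat) : Int :=
  (if m = kj.1 ∧ b kj.1 kj.2 then 1 else 0) + (if m = kj.2 ∧ b kj.2 kj.1 then 1 else 0)
def pvPairs (N : Nat) : List (Nat × Nat) :=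
  (List.range (N - 1)).flatMap (fun k => (List.range (N - 1 - k)).map (fun t => (k, k + t + 1)))
def pvW (b : Nat → Nat → Bool) (N m : Nat) : Int :=
  ∑ j ∈ Finset.range N, (if j ≠ m ∧ b m j then (1 : Int) else 0)

lemma pvBeat_asymm (P : List (String × String)) (a b : String) :
    pvBeat P a b = true → pvBeat P b a = true → False := by
  simp only [pvBeat, decide_eq_true_eq]; omega

lemma pvBeat_irrefl (P : List (String × String)) (a : String) : pvBeat P a a = false := by
  simp only [pvBeat, decide_eq_false_iff_not]; omega

lemma pvGp_getD (P : List (String × String)) (st : PySem.Dict String Int) (x : String) :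
    (P.foldl (fun d p => (d.modify p.1 0 (· + 1)).modify p.2 0 (· - 1)) st).getD x 0
      = st.getD x 0 + pvS P x := by
  induction P generalizing st with
  | nil => simp [pvS]
  | cons q P ih =>
      rw [List.foldl_cons, ih]
      have hs : pvS (q :: P) x
          = pvS P x + (if q.1 = x then 1 else 0) - (if q.2 = x then 1 else 0) := by
        simp only [pvS, List.filter_cons, decide_eq_true_eq]
        split_ifs <;> push_cast [List.length_cons] <;> ring
      have hd : ((st.modify q.1 0 (· + 1)).modify q.2 0 (· - 1)).getD x 0
          = st.getD x 0 + (if q.1 = x then 1 else 0) - (if q.2 = x then 1 else 0) := by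
        simp only [PySem.Dict.getD_modify]
        by_cases h1 : x = q.2 <;> by_cases h2 : x = q.1 <;> by_cases h3 : q.2 = q.1 <;>
          simp_all <;>
          first
            | exact fun h => h3 h.symm
            | (rw [if_neg (fun h => h2 h.symm), if_neg (fun h => h1 h.symm)]; ring)
      rw [hd, hs]; ring

-- the score-dict step of B's first loop, seen on pairs
def pvScStep (d : PySem.Dict String Int) (p : String × String) : PySem.Dict String Int :=
  let d1 := d.insert p.1 (d.getD p.1 0 + 1)
  d1.insert p.2 (d1.getD p.2 0 - 1)

lemma pvSc_getD (P : List (String × String)) (st : PySem.Dict String Int) (x : String) :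
    (P.foldl pvScStep st).getD x 0 = st.getD x 0 + pvS P x := by
  induction P generalizing st with
  | nil => simp [pvS]
  | cons q P ih =>
      rw [List.foldl_cons, ih]
      have hs : pvS (q :: P) x
          = pvS P x + (if q.1 = x then 1 else 0) - (if q.2 = x then 1 else 0) := by
        simp only [pvS, List.filter_cons, decide_eq_true_eq]
        split_ifs <;> push_cast [List.length_cons] <;> ring
      have hd : (pvScStep st q).getD x 0
          = st.getD x 0 + (if q.1 = x then 1 else 0) - (if q.2 = x then 1 else 0) := by
        simp only [pvScStep, PySem.Dict.getD_insert]
        by_cases h1 : x = q.2 <;> by_cases h2 : x = q.1 <;> by_cases h3 : q.2 = q.1 <;>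
          simp_all <;>
          first
            | exact fun h => h3 h.symm
            | (rw [if_neg (fun h => h2 h.symm), if_neg (fun h => h1 h.symm)]; ring)
      rw [hd, hs]; ring

lemma pvInsertZero_getD (l : List String) (d : PySem.Dict String Int) (k : String)
    (h : d.getD k 0 = 0) : (l.foldl (fun d x => d.insert x 0) d).getD k 0 = 0 := by
  induction l generalizing d with
  | nil => exact h
  | cons a t ih =>
      rw [List.foldl_cons]
      exact ih _ (by rw [PySem.Dict.getD_insert]; split_ifs <;> simp [h])

lemma pvInsertZeroP_getD (l : List (String × String)) (d : PySem.Dict (String × String) Int)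
    (k : String × String) (h : d.getD k 0 = 0) :
    (l.foldl (fun d x => d.insert x 0) d).getD k 0 = 0 := by
  induction l generalizing d with
  | nil => exact h
  | cons a t ih =>
      rw [List.foldl_cons]
      exact ih _ (by rw [PySem.Dict.getD_insert]; split_ifs <;> simp [h])

lemma pvStep_length (b : Nat → Nat → Bool) (r : List Int) (kj : Nat × Nat) :
    (pvStep b r kj).length = r.length := by
  unfold pvStep; split_ifs <;> simp

lemma pvStep_getD (b : Nat → Nat → Bool)
    (hasym : ∀ i j, b i j = true → b j i = true → False)
    (r : List Int) (kj : Nat × Nat) (hk : kj.1 < kj.2) (hj : kj.2 < r.length) (m : Nat) :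
    (pvStep b r kj).getD m 0 = r.getD m 0 + pvContrib b m kj := by
  obtain ⟨k, j⟩ := kj
  simp only [pvStep, pvContrib] at *
  have hkl : k < r.length := lt_trans hk hj
  have hset : ∀ (r : List Int) (k : Nat), k < r.length → ∀ m : Nat,
      (r.set k (r.getD k 0 + 1)).getD m 0 = r.getD m 0 + (if m = k then 1 else 0) := by
    intro r k hk m
    by_cases hmk : m = k
    · subst hmk; simp [List.getD_eq_getElem?_getD, hk]
    · have hkm : ¬ k = m := fun h => hmk h.symm
      simp [List.getD_eq_getElem?_getD, hkm, hmk]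
  by_cases h1 : b k j <;> by_cases h2 : b j k
  · exact absurd (hasym _ _ h1 h2) (by simp)
  · simp only [h1, h2, if_true, Bool.false_eq_true, and_false, if_false, and_true, add_zero]
    exact hset r k hkl m
  · simp only [h1, h2, if_true, Bool.false_eq_true, and_false, if_false, and_true, zero_add]
    exact hset r j hj m
  · simp [h1, h2]

lemma pvFold_getD (b : Nat → Nat → Bool)
    (hasym : ∀ i j, b i j = true → b j i = true → False) :
    ∀ (L : List (Nat × Nat)) (r : List Int),
      (∀ kj ∈ L, kj.1 < kj.2 ∧ kj.2 < r.length) →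
      (L.foldl (pvStep b) r).length = r.length ∧
      ∀ m, (L.foldl (pvStep b) r).getD m 0 = r.getD m 0 + (L.map (pvContrib b m)).sum := by
  intro L
  induction L with
  | nil => intro r _; simp
  | cons kj L ih =>
      intro r h
      have hkj := h kj (List.mem_cons_self ..)
      have hrest : ∀ x ∈ L, x.1 < x.2 ∧ x.2 < (pvStep b r kj).length := by
        intro x hx; rw [pvStep_length]; exact h x (List.mem_cons_of_mem _ hx)
      obtain ⟨ihl, ihd⟩ := ih (pvStep b r kj) hrest
      refine ⟨by rw [List.foldl_cons, ihl, pvStep_length], fun m => ?_⟩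
      rw [List.foldl_cons, ihd m, pvStep_getD b hasym r kj hkj.1 hkj.2 m]
      simp [add_assoc]

lemma pvSum_range {M : Type} [AddCommMonoid M] (f : Nat → M) (n : Nat) :
    ((List.range n).map f).sum = ∑ i ∈ Finset.range n, f i := by
  induction n with
  | zero => simp
  | succ n ih => rw [List.range_succ, Finset.sum_range_succ, ← ih]; simp

lemma pvSum_flatMap {α M : Type} [AddCommMonoid M] (l : List α) (g : α → List M) :
    (l.flatMap g).sum = (l.map (fun x => (g x).sum)).sum := by
  induction l <;> simp [*]

lemma pvSum (b : Nat → Nat → Bool) (N m : Nat) (hm : m < N) :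
    ((pvPairs N).map (pvContrib b m)).sum = pvW b N m := by
  have h1 : ((pvPairs N).map (pvContrib b m)).sum
      = ∑ k ∈ Finset.range (N-1), ∑ t ∈ Finset.range (N-1-k), pvContrib b m (k, k+t+1) := by
    unfold pvPairs
    rw [List.map_flatMap, pvSum_flatMap, ← pvSum_range]
    congr 1
    refine List.map_congr_left (fun k _ => ?_)
    rw [List.map_map, ← pvSum_range]
    rfl
  have hS1 : (∑ k ∈ Finset.range (N-1), ∑ t ∈ Finset.range (N-1-k),
        (if m = k ∧ b k (k+t+1) then (1:Int) else 0))
      = ∑ t ∈ Finset.range (N-1-m), (if b m (m+t+1) then (1:Int) else 0) := by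
    by_cases hmN : m < N - 1
    · rw [Finset.sum_eq_single_of_mem m (Finset.mem_range.2 hmN)]
      · exact Finset.sum_congr rfl (fun t _ => by simp)
      · intro k _ hk
        exact Finset.sum_eq_zero (fun t _ => by simp [Ne.symm hk])
    · have hz : N - 1 - m = 0 := by omega
      rw [hz]
      simp only [Finset.range_zero, Finset.sum_empty]
      refine Finset.sum_eq_zero (fun k hk => Finset.sum_eq_zero (fun t _ => ?_))
      have : ¬ m = k := by have := Finset.mem_range.1 hk; omega
      simp [this]
  have hS2 : (∑ k ∈ Finset.range (N-1), ∑ t ∈ Finset.range (N-1-k),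
        (if m = k+t+1 ∧ b (k+t+1) k then (1:Int) else 0))
      = ∑ k ∈ Finset.range m, (if b m k then (1:Int) else 0) := by
    have hinner : ∀ k ∈ Finset.range (N-1),
        (∑ t ∈ Finset.range (N-1-k), (if m = k+t+1 ∧ b (k+t+1) k then (1:Int) else 0))
          = if k < m then (if b m k then (1:Int) else 0) else 0 := by
      intro k hk
      have hkN := Finset.mem_range.1 hk
      by_cases hkm : k < m
      · rw [if_pos hkm]
        rw [Finset.sum_eq_single_of_mem (m - k - 1) (Finset.mem_range.2 (by omega))]
        · have hme : k + (m - k - 1) + 1 = m := by omega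
          rw [hme]; simp
        · intro t _ ht
          have : ¬ m = k + t + 1 := by omega
          simp [this]
      · rw [if_neg hkm]
        refine Finset.sum_eq_zero (fun t _ => ?_)
        have : ¬ m = k + t + 1 := by omega
        simp [this]
    have hsub : Finset.range m ⊆ Finset.range (N-1) := by
      intro x hx; simp only [Finset.mem_range] at hx ⊢; omega
    have hzero : ∀ x ∈ Finset.range (N-1), x ∉ Finset.range m →
        (if x < m then (if b m x then (1:Int) else 0) else 0) = 0 := by
      intro x _ hx
      rw [if_neg (by simpa using hx)]
    rw [Finset.sum_congr rfl hinner, ← Finset.sum_subset hsub hzero]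
    exact Finset.sum_congr rfl (fun k hk => if_pos (Finset.mem_range.1 hk))
  have hW : pvW b N m
      = (∑ k ∈ Finset.range m, (if b m k then (1:Int) else 0))
        + ∑ t ∈ Finset.range (N-1-m), (if b m (m+t+1) then (1:Int) else 0) := by
    unfold pvW
    have hA : (∑ j ∈ Finset.range N, (if j ≠ m ∧ b m j then (1:Int) else 0))
        = (∑ j ∈ Finset.range m, (if j ≠ m ∧ b m j then (1:Int) else 0))
          + ∑ j ∈ Finset.Ico m N, (if j ≠ m ∧ b m j then (1:Int) else 0) := by
      rw [show Finset.range N = Finset.Ico 0 N from congrFun Finset.range_eq_Ico N,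
        ← Finset.sum_Ico_consecutive _ (Nat.zero_le m) hm.le, ← Finset.range_eq_Ico]
    have hB : (∑ j ∈ Finset.Ico m N, (if j ≠ m ∧ b m j then (1:Int) else 0))
        = (if m ≠ m ∧ b m m then (1:Int) else 0)
          + ∑ j ∈ Finset.Ico (m+1) N, (if j ≠ m ∧ b m j then (1:Int) else 0) :=
      Finset.sum_eq_sum_Ico_succ_bot hm _
    have hC : (∑ j ∈ Finset.Ico (m+1) N, (if j ≠ m ∧ b m j then (1:Int) else 0))
        = ∑ t ∈ Finset.range (N - (m+1)), (if m+1+t ≠ m ∧ b m (m+1+t) then (1:Int) else 0) :=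
      Finset.sum_Ico_eq_sum_range _ (m+1) N
    have e1 : (∑ j ∈ Finset.range m, (if j ≠ m ∧ b m j then (1:Int) else 0))
        = ∑ k ∈ Finset.range m, (if b m k then (1:Int) else 0) := by
      refine Finset.sum_congr rfl (fun k hk => ?_)
      have : k ≠ m := by have := Finset.mem_range.1 hk; omega
      simp [this]
    have e2 : (∑ t ∈ Finset.range (N - (m+1)), (if m+1+t ≠ m ∧ b m (m+1+t) then (1:Int) else 0))
        = ∑ t ∈ Finset.range (N-1-m), (if b m (m+t+1) then (1:Int) else 0) := by
      have : N - (m+1) = N-1-m := by omega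
      rw [this]
      refine Finset.sum_congr rfl (fun t _ => ?_)
      have h2 : m+1+t = m+t+1 := by omega
      have h3 : m+t+1 ≠ m := by omega
      rw [h2]; simp [h3]
    rw [hA, hB, hC, e1, e2]
    simp
  rw [h1]
  simp only [pvContrib]
  rw [Finset.sum_congr rfl (fun k _ => Finset.sum_add_distrib), Finset.sum_add_distrib, hS1, hS2, hW]
  ring

-- beats-by-index, seen from a friend list
def pvB (friends : List String) (P : List (String × String)) (i j : Nat) : Bool :=
  pvBeat P (friends.getD i "") (friends.getD j "")

lemma pvB_asymm (friends : List String) (P : List (String × String)) :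
    ∀ i j, pvB friends P i j = true → pvB friends P j i = true → False :=
  fun _ _ h1 h2 => pvBeat_asymm P _ _ h1 h2

lemma pvPairs_bounds (N : Nat) : ∀ kj ∈ pvPairs N, kj.1 < kj.2 ∧ kj.2 < N := by
  intro kj hkj
  unfold pvPairs at hkj
  simp only [List.mem_flatMap, List.mem_map, List.mem_range] at hkj
  obtain ⟨k, hk, t, ht, rfl⟩ := hkj
  omega

lemma pvAFold (gifts : List String) (hsh : ∀ g ∈ gifts, ∃ a b, PySem.Str.split₀ g = [a, b])
    (d1 : PySem.Dict String Int) (d2 : PySem.Dict (String × String) Int) :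
    gifts.foldl solutionGiftStep (d1, d2)
      = ((gifts.map pvPairOf).foldl
            (fun d p => (d.modify p.1 0 (· + 1)).modify p.2 0 (· - 1)) d1,
         (gifts.map pvPairOf).foldl (fun d p => d.modify p 0 (· + 1)) d2) := by
  induction gifts generalizing d1 d2 with
  | nil => rfl
  | cons g t ih =>
      obtain ⟨a, b, hab⟩ := hsh g (List.mem_cons_self ..)
      have hp : pvPairOf g = (a, b) := by unfold pvPairOf; rw [hab]
      simp only [List.foldl_cons, List.map_cons, solutionGiftStep, hab, hp]
      exact ih (fun g hg => hsh g (List.mem_cons_of_mem _ hg)) _ _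

lemma pvBFold (gifts : List String) (hsh : ∀ g ∈ gifts, ∃ a b, PySem.Str.split₀ g = [a, b])
    (d1 : PySem.Dict (String × String) Int) (d2 : PySem.Dict String Int) :
    gifts.foldl solutionAltStep (d1, d2)
      = ((gifts.map pvPairOf).foldl (fun d p => d.insert p (d.getD p 0 + 1)) d1,
         (gifts.map pvPairOf).foldl pvScStep d2) := by
  induction gifts generalizing d1 d2 with
  | nil => rfl
  | cons g t ih =>
      obtain ⟨a, b, hab⟩ := hsh g (List.mem_cons_self ..)
      have hp : pvPairOf g = (a, b) := by unfold pvPairOf; rw [hab]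
      simp only [List.foldl_cons, List.map_cons, solutionAltStep, pvScStep, hab, hp]
      exact ih (fun g hg => hsh g (List.mem_cons_of_mem _ hg)) _ _

lemma pvIfChain (P : List (String × String)) (friends : List String) (r : List Int) (k j : Nat) :
    (if ((P.count (friends.getD k "", friends.getD j "") : Int)
          > (P.count (friends.getD j "", friends.getD k "") : Int)) then
        r.set k (r.getD k 0 + 1)
      else if ((P.count (friends.getD k "", friends.getD j "") : Int)
          < (P.count (friends.getD j "", friends.getD k "") : Int)) then
        r.set j (r.getD j 0 + 1)
      else if pvS P (friends.getD k "") > pvS P (friends.getD j "") then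
        r.set k (r.getD k 0 + 1)
      else if pvS P (friends.getD k "") < pvS P (friends.getD j "") then
        r.set j (r.getD j 0 + 1)
      else r)
    = pvStep (pvB friends P) r (k, j) := by
  unfold pvStep pvB pvBeat pvC
  simp only [decide_eq_true_eq]
  split_ifs <;> first | rfl | omega

lemma pvNestedFold (bb : Nat → Nat → Bool) (r0 : List Int) (N : Nat) :
    (List.range (N - 1)).foldl (fun r k =>
        (List.range (N - 1 - k)).foldl (fun r t => pvStep bb r (k, k + t + 1)) r) r0
      = (pvPairs N).foldl (pvStep bb) r0 := by
  unfold pvPairs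
  rw [List.foldl_flatMap]
  simp only [List.foldl_map]

lemma pvFilterLen (p : String → Bool) (t : List String) :
    ((t.filter p).length : Int)
      = ∑ j ∈ Finset.range t.length, (if p (t.getD j "") then (1:Int) else 0) := by
  induction t with
  | nil => simp
  | cons a t ih =>
      rw [List.length_cons, Finset.sum_range_succ' _ t.length]
      simp only [List.getD_cons_succ, List.getD_cons_zero, List.filter_cons]
      rw [← ih]
      split_ifs <;> simp

-- the win list of B's recursion: length and pointwise value
lemma pvAltGo_spec (beats : String → String → Bool)
    (hirr : ∀ a b : String, a = b → beats a b = false) :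
    ∀ lst : List String, (solutionAltGo beats lst).length = lst.length ∧
      ∀ m, m < lst.length → (solutionAltGo beats lst).getD m 0
        = ∑ j ∈ Finset.range lst.length,
            (if beats (lst.getD m "") (lst.getD j "") then (1:Int) else 0) := by
  intro lst
  induction lst with
  | nil => simp [solutionAltGo]
  | cons h t ih =>
      obtain ⟨ihl, ihd⟩ := ih
      have hzlen : ((solutionAltGo beats t).zip t).length = t.length := by
        rw [List.length_zip, ihl, min_self]
      constructor
      · simp only [solutionAltGo, List.length_cons, List.length_map, hzlen]
      · intro m hm
        cases m with
        | zero =>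
            simp only [solutionAltGo, List.getD_cons_zero, List.length_cons]
            rw [Finset.sum_range_succ' _ t.length]
            simp only [List.getD_cons_succ, List.getD_cons_zero]
            rw [hirr h h rfl]
            simp only [Bool.false_eq_true, if_false, add_zero]
            exact pvFilterLen _ t
        | succ m =>
            have hmt : m < t.length := by simpa using hm
            have hmz : m < ((solutionAltGo beats t).zip t).length := by rw [hzlen]; exact hmt
            have hmm : m < (((solutionAltGo beats t).zip t).map
                (fun wo => wo.1 + (if beats wo.2 h then 1 else 0))).length := by
              simpa [hzlen] using hmt
            simp only [solutionAltGo, List.getD_cons_succ]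
            rw [List.getD_eq_getElem _ _ hmm, List.getElem_map, List.getElem_zip]
            have hg : (solutionAltGo beats t)[m]'(by rw [ihl]; exact hmt)
                = (solutionAltGo beats t).getD m 0 :=
              (List.getD_eq_getElem _ _ _).symm
            have ht' : t[m]'hmt = t.getD m "" := (List.getD_eq_getElem _ _ _).symm
            rw [hg, ht', ihd m hmt]
            rw [List.length_cons, Finset.sum_range_succ' _ t.length]
            simp only [List.getD_cons_succ, List.getD_cons_zero]

-- ===== VERDICT (by name: the statement is the Claim_ definition above) =====
theorem solution_spec : Claim_equal_solution := by
  intro friends gifts _ hpre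
  obtain ⟨hne, hsh0⟩ := hpre
  have hsh : ∀ g ∈ gifts, ∃ a b, PySem.Str.split₀ g = [a, b] := by
    intro g hg
    obtain ⟨a, _, b, _, hab, _⟩ := hsh0 g hg
    exact ⟨a, b, hab⟩
  unfold Spec_solution
  set N := friends.length with hN
  set P := gifts.map pvPairOf with hP
  set bb := pvB friends P with hbb
  have hNpos : 0 < N := by
    cases friends with
    | nil => exact absurd rfl hne
    | cons a t => simp [hN]
  have hnm : ∀ (l : List (String × String)) (key : String × String),
      ((P.foldl (fun d p => d.modify p 0 (· + 1))
          (l.foldl (fun d k => d.insert k 0) PySem.Dict.empty)).getD key 0)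
        = (P.count key : Int) := by
    intro l key
    rw [PySem.Dict.getD_foldl_modify_add_one,
      pvInsertZeroP_getD _ _ _ (PySem.Dict.getD_empty _ _), zero_add]
  have hgp : ∀ (l : List String) (x : String),
      ((P.foldl (fun d p => (d.modify p.1 0 (· + 1)).modify p.2 0 (· - 1))
          (l.foldl (fun d x => d.insert x 0) PySem.Dict.empty)).getD x 0)
        = pvS P x := by
    intro l x
    rw [pvGp_getD, pvInsertZero_getD _ _ _ (PySem.Dict.getD_empty _ _), zero_add]
  have hA : solution friends gifts
      = PySem.List.maxD ((pvPairs N).foldl (pvStep bb) (List.replicate N 0)) (fun y => y) 0 := by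
    unfold solution
    dsimp only
    rw [pvAFold gifts hsh]
    dsimp only
    rw [← hP]
    simp only [hnm, hgp]
    have hrange1 : PySem.List.pyRange 0 (PySem.List.len friends - 1)
        = (List.range (N - 1)).map (fun k : Nat => (k : Int)) := by
      rw [PySem.List.len, PySem.List.pyRange_one]
      have h1 : ((friends.length : Int) - 1 - 0).toNat = N - 1 := by
        rw [hN]; omega
      rw [h1]
      exact List.map_congr_left (fun k _ => zero_add _)
    have hrange2 : ∀ κ : Nat, PySem.List.pyRange (κ : Int) (PySem.List.len friends - 1)
        = (List.range (N - 1 - κ)).map (fun t : Nat => ((κ + t : Nat) : Int)) := by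
      intro κ
      rw [PySem.List.len, PySem.List.pyRange_one]
      have h1 : ((friends.length : Int) - 1 - κ).toNat = N - 1 - κ := by
        rw [hN]; omega
      rw [h1]
      exact List.map_congr_left (fun t _ => by push_cast; ring)

    rw [hrange1]
    simp only [List.foldl_map]
    simp only [hrange2, List.foldl_map]
    simp only [show ∀ (a : Nat), ((a : Int) + 1) = ((a + 1 : Nat) : Int) from
      fun a => by push_cast; ring]
    simp only [PySem.List.pyGetD_natCast, PySem.List.pySetD_natCast]
    simp only [pvIfChain, ← hbb]
    rw [pvNestedFold, ← hN]
  have hR : (pvPairs N).foldl (pvStep bb) (List.replicate N 0)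
      = (List.range N).map (pvW bb N) := by
    obtain ⟨hlen, hget⟩ := pvFold_getD bb (pvB_asymm friends P) (pvPairs N)
      (List.replicate N 0) (by simpa using pvPairs_bounds N)
    apply List.ext_getElem
    · rw [hlen]; simp
    · intro m hm1 hm2
      have hmN : m < N := by simpa using hm2
      have e1 : ((pvPairs N).foldl (pvStep bb) (List.replicate N 0))[m]
          = ((pvPairs N).foldl (pvStep bb) (List.replicate N 0)).getD m 0 :=
        (List.getD_eq_getElem _ _ hm1).symm
      rw [e1, hget m, pvSum bb N m hmN]
      simp [List.getD_eq_getElem?_getD]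
  have hB : solution_alt friends gifts
      = PySem.List.maxD ((List.range N).map (pvW bb N)) (fun y => y) 0 := by
    unfold solution_alt
    dsimp only
    rw [pvBFold gifts hsh]
    dsimp only
    rw [← hP]
    have hcnt : ∀ (key : String × String),
        ((P.foldl (fun d p => d.insert p (d.getD p 0 + 1)) PySem.Dict.empty).getD key 0)
          = (P.count key : Int) := by
      intro key
      rw [PySem.Dict.getD_foldl_insert_add_one, PySem.Dict.getD_empty, zero_add]
    have hsc : ∀ x : String, ((P.foldl pvScStep PySem.Dict.empty).getD x 0) = pvS P x := by
      intro x
      rw [pvSc_getD, PySem.Dict.getD_empty, zero_add]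
    have hbeats : solutionAltBeats
        (P.foldl (fun d p => d.insert p (d.getD p 0 + 1)) PySem.Dict.empty)
        (P.foldl pvScStep PySem.Dict.empty) = pvBeat P := by
      funext x y
      unfold solutionAltBeats pvBeat pvC
      rw [hcnt, hcnt, hsc, hsc]
    rw [hbeats]
    have hirr : ∀ a b : String, a = b → pvBeat P a b = false := by
      intro a b hab; subst hab; exact pvBeat_irrefl P a
    obtain ⟨hlen, hget⟩ := pvAltGo_spec (pvBeat P) hirr friends
    have hlist : solutionAltGo (pvBeat P) friends = (List.range N).map (pvW bb N) := by
      apply List.ext_getElem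
      · rw [hlen]; simp [hN]
      · intro m hm1 hm2
        have hmN : m < N := by simpa using hm2
        have e1 : (solutionAltGo (pvBeat P) friends)[m]
            = (solutionAltGo (pvBeat P) friends).getD m 0 :=
          (List.getD_eq_getElem _ _ hm1).symm
        rw [e1, hget m (by rw [← hN]; exact hmN)]
        have hterm : ∀ j ∈ Finset.range friends.length,
            (if pvBeat P (friends.getD m "") (friends.getD j "") then (1:Int) else 0)
              = (if j ≠ m ∧ bb m j then (1:Int) else 0) := by
          intro j _
          by_cases hjm : j = m
          · subst hjm
            rw [pvBeat_irrefl]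
            simp
          · rw [hbb]
            unfold pvB
            simp [hjm]
        rw [Finset.sum_congr rfl hterm]
        simp only [List.getElem_map, List.getElem_range]
        rw [← hN]
        rfl
    rw [hlist]
  rw [hA, hR, hB]
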